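-- pv_equiv track=rewrite | github.com/cmacht/aoc | 2023/13/puzzle13.py | search_field
-- ===== SOURCE A (Python) =====
-- def search_field(field):
-- 	for idx, line in enumerate(field):
-- 		if idx == len(field)-1:
-- 			break  # break after max index
-- 		if line == field[idx+1]:
-- 			if is_fully_reflected(field, idx):
-- 				return idx+1 #lines above
-- 	return 0
--
-- def is_fully_reflected(field, idx, factor=1, is_fully=False):
-- 	#search outwards
-- 	if idx-factor < 0 or idx+1+factor > len(field)-1:
-- 		return True
-- 	if field[idx-factor] == field[idx+1+factor]:
-- 		factor += 1
-- 		is_fully = is_fully_reflected(field, idx, factor, is_fully)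
-- 		return is_fully
-- 	else:
-- 		return False
-- ===== SOURCE B (Python) =====
-- def search_field(field):
--     for i in range(1, len(field)):
--         if all(a == b for a, b in zip(reversed(field[:i]), field[i:])):
--             return i
--     return 0
-- ===== Notes on version B (the rewrite author's own statement) =====
-- stated objective: idiomatic
-- what changed: A's adjacency pre-check plus a recursive outward search (is_fully_reflected) is replaced by a single loop over candidate split points that compares the reversed prefix against the suffix with zip/all, returning the first matching split.
import Mathlib
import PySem

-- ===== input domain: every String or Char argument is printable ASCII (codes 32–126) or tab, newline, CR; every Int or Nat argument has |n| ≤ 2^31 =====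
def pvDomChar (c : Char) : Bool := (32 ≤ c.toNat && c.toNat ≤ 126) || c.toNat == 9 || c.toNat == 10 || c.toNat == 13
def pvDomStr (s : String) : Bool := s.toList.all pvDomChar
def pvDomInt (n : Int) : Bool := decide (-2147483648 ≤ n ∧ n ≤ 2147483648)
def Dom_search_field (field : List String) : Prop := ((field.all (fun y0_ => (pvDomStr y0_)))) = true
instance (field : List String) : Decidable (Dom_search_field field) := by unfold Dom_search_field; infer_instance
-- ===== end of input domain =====

-- B replaces A's adjacency pre-check plus recursive outward search by a single loop that
-- compares the reversed prefix against the suffix with zip/all (objective: more idiomatic).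

-- ===== PORT A =====
-- is_fully_reflected(field, idx, factor=1, is_fully=False); fuel only makes the recursion
-- structural — with fuel > len(field) - (idx+1+factor) the base case is never reached
def is_fully_reflected (field : List String) (idx factor : Int) (is_fully : Bool) (fuel : Nat) : Bool :=
  match fuel with
  | 0 => true
  | fuel + 1 =>
    if idx - factor < 0 ∨ idx + 1 + factor > (field.length : Int) - 1 then
      true
    else if PySem.List.pyGet? field (idx - factor) == PySem.List.pyGet? field (idx + 1 + factor) then
      -- factor += 1; is_fully = recursive call; return is_fully
      is_fully_reflected field idx (factor + 1) is_fully fuel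
    else
      false

-- the 'for idx, line in enumerate(field)' loop of A; rem counts the remaining iterations
def searchLoopA (field : List String) (idx rem : Nat) : Int :=
  match rem with
  | 0 => 0
  | rem + 1 =>
    if (idx : Int) = (field.length : Int) - 1 then 0  -- break → fall through to return 0
    else if PySem.List.pyGet? field (idx : Int) == PySem.List.pyGet? field ((idx : Int) + 1) then
      if is_fully_reflected field (idx : Int) 1 false (field.length + 1) then (idx : Int) + 1
      else searchLoopA field (idx + 1) rem
    else searchLoopA field (idx + 1) rem

def search_field (field : List String) : Int := searchLoopA field 0 field.length

-- ===== PORT B =====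
-- the 'for i in range(1, len(field))' loop of B; rem counts the remaining iterations
def searchLoopB (field : List String) (i rem : Nat) : Int :=
  match rem with
  | 0 => 0
  | rem + 1 =>
    if ((field.take i).reverse.zip (field.drop i)).all (fun p => p.1 == p.2) then (i : Int)
    else searchLoopB field (i + 1) rem

def search_field_alt (field : List String) : Int := searchLoopB field 1 (field.length - 1)

-- ===== PRECONDITION & SPEC =====
def Spec_search_field (field : List String) (out : Int) : Prop := out = search_field_alt field
instance (field : List String) (out : Int) : Decidable (Spec_search_field field out) := by unfold Spec_search_field; infer_instance

-- ===== CLAIM (what is proved, stated in full; the proofs are below) =====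
def Claim_equal_search_field : Prop := ∀ (field : List String), Dom_search_field field → Spec_search_field field (search_field field)

-- ===== LEMMAS AND PROOFS =====

theorem pyGet?_of_bounds (xs : List String) (i : Int) (h0 : 0 ≤ i) (h1 : i < (xs.length : Int)) :
    PySem.List.pyGet? xs i = xs[i.toNat]? := by
  simp only [PySem.List.pyGet?, PySem.List.pyIdx?]
  rw [if_pos h0, if_pos h1]
  rfl

-- characterisation of A's recursive outward search: all pairs at distance ≥ factor agree
theorem is_fully_iff (field : List String) (b : Bool) (fuel : Nat) :
    ∀ (idx factor : Int), 1 ≤ factor → (field.length : Int) - (idx + 1 + factor) < fuel →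
      (is_fully_reflected field idx factor b fuel = true ↔
        ∀ k : Int, factor ≤ k → 0 ≤ idx - k → idx + 1 + k ≤ (field.length : Int) - 1 →
          field[(idx - k).toNat]? = field[(idx + 1 + k).toNat]?) := by
  induction fuel with
  | zero =>
    intro idx factor hf hfuel
    simp only [is_fully_reflected, true_iff]
    intro k hk h0 h1; omega
  | succ fuel ih =>
    intro idx factor hf hfuel
    simp only [is_fully_reflected]
    split_ifs with hout heq
    · simp only [true_iff]
      intro k hk h0 h1; omega
    · rw [ih idx (factor + 1) (by omega) (by omega)]
      constructor
      · intro h k hk h0 h1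
        rcases eq_or_lt_of_le hk with rfl | hlt
        · rw [pyGet?_of_bounds _ _ (by omega) (by omega),
              pyGet?_of_bounds _ _ (by omega) (by omega)] at heq
          exact eq_of_beq heq
        · exact h k (by omega) h0 h1
      · intro h k hk h0 h1
        exact h k (by omega) h0 h1
    · simp only [false_iff]
      intro hall
      have hpair := hall factor le_rfl (by omega) (by omega)
      rw [pyGet?_of_bounds _ _ (by omega) (by omega),
          pyGet?_of_bounds _ _ (by omega) (by omega)] at heq
      exact heq (beq_iff_eq.mpr hpair)

-- characterisation of B's zip/all check
theorem zip_all_iff (field : List String) (i : Nat) (hi : i ≤ field.length) :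
    ((((field.take i).reverse.zip (field.drop i)).all (fun p => p.1 == p.2)) = true) ↔
      ∀ k : Nat, k < min i (field.length - i) → field[i - 1 - k]? = field[i + k]? := by
  have hlt : (field.take i).length = i := by simp; omega
  rw [List.all_eq_true]
  constructor
  · intro h k hk
    have hk1 : k < i := by omega
    have hk2 : k < field.length - i := by omega
    have htop : (field.take i).reverse[k]? = field[i - 1 - k]? := by
      rw [List.getElem?_reverse (by rw [hlt]; omega), hlt, List.getElem?_take_of_lt (by omega)]
    have hbot : (field.drop i)[k]? = field[i + k]? := List.getElem?_drop
    have hb1 : i - 1 - k < field.length := by omega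
    have hb2 : i + k < field.length := by omega
    rw [List.getElem?_eq_getElem hb1] at htop
    rw [List.getElem?_eq_getElem hb2] at hbot
    have hmem : (field[i - 1 - k], field[i + k]) ∈ (field.take i).reverse.zip (field.drop i) := by
      apply List.mem_of_getElem?
      rw [List.getElem?_zip_eq_some]
      exact ⟨htop, hbot⟩
    have := h _ hmem
    simp only [beq_iff_eq] at this
    rw [List.getElem?_eq_getElem hb1, List.getElem?_eq_getElem hb2, this]
  · intro h p hp
    obtain ⟨k, hk⟩ := List.mem_iff_getElem?.mp hp
    rw [List.getElem?_zip_eq_some] at hk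
    obtain ⟨h1, h2⟩ := hk
    have hk1 : k < i := by
      obtain ⟨hh, -⟩ := List.getElem?_eq_some_iff.mp h1
      simpa [hlt] using hh
    have hk2 : k < field.length - i := by
      obtain ⟨hh, -⟩ := List.getElem?_eq_some_iff.mp h2
      simpa using hh
    rw [List.getElem?_reverse (by rw [hlt]; omega), hlt, List.getElem?_take_of_lt (by omega)] at h1
    rw [List.getElem?_drop] at h2
    have heq := h k (by omega)
    rw [h1, h2] at heq
    obtain ⟨a, b⟩ := p
    simp only [beq_iff_eq]
    exact Option.some.inj heq

-- the inner checks agree: A's adjacency test plus full-reflection search ↔ B's zip/all at i = idx+1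
theorem inner_check_eq (field : List String) (idx : Nat) (hlt1 : idx + 1 < field.length) :
    ((PySem.List.pyGet? field (idx : Int) == PySem.List.pyGet? field ((idx : Int) + 1)) &&
      is_fully_reflected field (idx : Int) 1 false (field.length + 1)) =
    (((field.take (idx+1)).reverse.zip (field.drop (idx+1))).all (fun p => p.1 == p.2)) := by
  rw [Bool.eq_iff_iff, Bool.and_eq_true,
      is_fully_iff field false (field.length + 1) (idx : Int) 1 (by omega) (by omega),
      zip_all_iff field (idx+1) (by omega)]
  constructor
  · rintro ⟨hadj, hful⟩ k hk
    rcases Nat.eq_zero_or_pos k with rfl | hkpos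
    · rw [pyGet?_of_bounds _ _ (by omega) (by omega),
          pyGet?_of_bounds _ _ (by omega) (by omega)] at hadj
      have := eq_of_beq hadj
      convert this using 2
    · have := hful (k : Int) (by omega) (by omega) (by omega)
      convert this using 2
      omega
  · intro h
    constructor
    · have := h 0 (by omega)
      rw [pyGet?_of_bounds _ _ (by omega) (by omega),
          pyGet?_of_bounds _ _ (by omega) (by omega)]
      apply beq_iff_eq.mpr
      convert this using 2
    · intro k hf h0 h1
      have := h k.toNat (by omega)
      convert this using 2 <;> omega

-- the two loops agree: B at i = idx+1 tracks A at idx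
theorem loops_eq (field : List String) :
    ∀ (rem idx : Nat), rem = field.length - idx →
      searchLoopA field idx rem = searchLoopB field (idx + 1) (field.length - (idx + 1)) := by
  intro rem
  induction rem with
  | zero =>
    intro idx h
    have h0 : field.length - (idx + 1) = 0 := by omega
    rw [h0]
    rfl
  | succ rem ih =>
    intro idx h
    have hlt : idx < field.length := by omega
    simp only [searchLoopA]
    by_cases hlast : (idx : Int) = (field.length : Int) - 1
    · rw [if_pos hlast]
      have h0 : field.length - (idx + 1) = 0 := by omega
      rw [h0]
      rfl
    · have hlt1 : idx + 1 < field.length := by omega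
      rw [if_neg hlast]
      have hrem : field.length - (idx + 1) = rem := by omega
      rw [hrem]
      obtain ⟨r, rfl⟩ : ∃ r, rem = r + 1 := ⟨rem - 1, by omega⟩
      simp only [searchLoopB]
      have hinner := inner_check_eq field idx hlt1
      by_cases hB : (((field.take (idx+1)).reverse.zip (field.drop (idx+1))).all (fun p => p.1 == p.2)) = true
      · rw [if_pos hB]
        rw [hB, Bool.and_eq_true] at hinner
        obtain ⟨hadj, hful⟩ := hinner
        rw [if_pos hadj, if_pos hful]
        push_cast; ring
      · rw [if_neg hB]
        have hrec := ih (idx + 1) (by omega)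
        rw [show field.length - (idx + 1 + 1) = r from by omega] at hrec
        have hAf : ((PySem.List.pyGet? field (idx : Int) == PySem.List.pyGet? field ((idx : Int) + 1)) &&
            is_fully_reflected field (idx : Int) 1 false (field.length + 1)) = false := by
          rw [hinner]; exact Bool.eq_false_iff.mpr hB
        by_cases hadj2 : (PySem.List.pyGet? field (idx : Int) == PySem.List.pyGet? field ((idx : Int) + 1)) = true
        · have hful : is_fully_reflected field (idx : Int) 1 false (field.length + 1) = false := by
            rw [hadj2] at hAf; simpa using hAf
          rw [if_pos hadj2, if_neg (by rw [hful]; simp)]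
          exact hrec
        · rw [if_neg hadj2]
          exact hrec

-- ===== VERDICT (by name: the statement is the Claim_ definition above) =====
theorem search_field_spec : Claim_equal_search_field := by
  intro field _
  unfold Spec_search_field search_field search_field_alt
  have h1 : field.length - 1 = field.length - (0 + 1) := by omega
  rw [h1]
  exact loops_eq field field.length 0 (by omega)
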